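-- pv_equiv track=rewrite | github.com/DaNiCHKaTZ/labs | tech/l5/lab5(22).py | count
-- ===== SOURCE A (Python) =====
-- def count(matrix):
--     last_column = set(matrix[i][-1] for i in range(len(matrix)))
--     count = 0
--     for j in range(len(matrix[0]) - 1):
--         column_set = set(matrix[i][j] for i in range(len(matrix)))
--         if column_set == last_column:
--             count += 1
--     return count
-- ===== SOURCE B (Python) =====
-- def count(matrix):
--     width = len(matrix[0]) - 1
--     sets = [set() for _ in range(width)]
--     target = set()
--     for row in matrix:
--         target.add(row[-1])
--         for j in range(width):
--             sets[j].add(row[j])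
--     freq = {}
--     for s in sets:
--         key = tuple(sorted(s))
--         freq[key] = freq.get(key, 0) + 1
--     return freq.get(tuple(sorted(target)), 0)
-- ===== Notes on version B (the rewrite author's own statement) =====
-- stated objective: alternative
-- what changed: B makes one row-major pass accumulating per-column value sets (A rescans the matrix column-by-column with index arithmetic), then counts via a frequency dict keyed by each column's canonical sorted-tuple signature and looks up the last column's signature, instead of comparing each column set against the last column's set.
import Mathlib
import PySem

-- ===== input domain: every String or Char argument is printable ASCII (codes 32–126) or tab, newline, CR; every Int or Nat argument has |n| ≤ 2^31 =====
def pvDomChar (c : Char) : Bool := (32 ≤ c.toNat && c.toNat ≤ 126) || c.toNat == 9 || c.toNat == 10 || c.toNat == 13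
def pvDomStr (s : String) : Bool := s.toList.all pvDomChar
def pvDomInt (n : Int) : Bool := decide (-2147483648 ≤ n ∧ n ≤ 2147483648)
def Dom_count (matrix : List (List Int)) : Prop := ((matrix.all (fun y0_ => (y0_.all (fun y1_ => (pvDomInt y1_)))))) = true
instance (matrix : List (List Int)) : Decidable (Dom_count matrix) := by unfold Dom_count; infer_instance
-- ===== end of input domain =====

-- B builds all column value-sets in one row-major pass and counts by looking up the last column's
-- canonical sorted signature in a frequency dict, instead of A's column-by-column rescans with set comparison.

-- ===== PORT A =====
def count (matrix : List (List Int)) : Int :=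
  let last_column : PySem.Set Int :=
    PySem.Set.ofList ((PySem.List.pyRange 0 matrix.length 1).map
      (fun i => PySem.List.pyGetD (PySem.List.pyGetD matrix i []) (-1) 0))
  (PySem.List.pyRange 0 (((PySem.List.pyGetD matrix 0 []).length : Int) - 1) 1).foldl
    (fun c j =>
      let column_set : PySem.Set Int :=
        PySem.Set.ofList ((PySem.List.pyRange 0 matrix.length 1).map
          (fun i => PySem.List.pyGetD (PySem.List.pyGetD matrix i []) j 0))
      if PySem.Set.equal column_set last_column then c + 1 else c) 0

-- ===== PORT B =====
def count_alt (matrix : List (List Int)) : Int :=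
  let width : Int := ((PySem.List.pyGetD matrix 0 []).length : Int) - 1
  let st : PySem.Set Int × List (PySem.Set Int) :=
    matrix.foldl
      (fun st row =>
        (PySem.Set.add st.1 (PySem.List.pyGetD row (-1) 0),
         (PySem.List.pyRange 0 width 1).foldl
           (fun sets j => sets.modify j.toNat (fun s => PySem.Set.add s (PySem.List.pyGetD row j 0)))
           st.2))
      (PySem.Set.empty, (PySem.List.pyRange 0 width 1).map (fun _ => PySem.Set.empty))
  let freq : PySem.Dict (List Int) Int :=
    st.2.foldl (fun d s => d.modify (PySem.List.sorted s (fun x => x)) 0 (fun c => c + 1)) PySem.Dict.empty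
  freq.getD (PySem.List.sorted st.1 (fun x => x)) 0

-- ===== PRECONDITION & SPEC =====
-- Pre_ excludes exactly the inputs on which A raises IndexError: the empty matrix, matrices with an
-- empty row (matrix[i][-1]), and matrices with a row shorter than len(matrix[0])-1 (matrix[i][j]).
def Pre_count (matrix : List (List Int)) : Prop :=
  matrix ≠ [] ∧ ∀ row ∈ matrix, row ≠ [] ∧ (matrix.headD []).length ≤ row.length + 1
instance (matrix : List (List Int)) : Decidable (Pre_count matrix) := by unfold Pre_count; infer_instance
def pvWitness_count : List (List Int) := [[1, 2], [2, 1]]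
def Spec_count (matrix : List (List Int)) (out : Int) : Prop := out = count_alt matrix
instance (matrix : List (List Int)) (out : Int) : Decidable (Spec_count matrix out) := by unfold Spec_count; infer_instance

-- ===== CLAIM (what is proved, stated in full; the proofs are below) =====
def Claim_equal_count : Prop := ∀ (matrix : List (List Int)), Dom_count matrix → Pre_count matrix → Spec_count matrix (count matrix)

-- ===== LEMMAS AND PROOFS =====

-- a generator over range(len(m)) reading m[i] is a map over m
theorem pv_map_range {β : Type} (m : List (List Int)) (g : List Int → β) :
    (PySem.List.pyRange 0 m.length 1).map (fun i => g (PySem.List.pyGetD m i [])) = m.map g := by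
  rw [PySem.List.pyRange_one]
  simp only [List.map_map, Function.comp_def, zero_add, Int.sub_zero, Int.toNat_natCast,
    PySem.List.pyGetD_natCast]
  induction m with
  | nil => simp
  | cons r rs ih =>
      simp only [List.length_cons, List.range_succ_eq_map, List.map_cons, List.map_map,
        Function.comp_def, List.getD_cons_zero, List.getD_cons_succ, List.map_cons]
      exact congrArg (g r :: ·) ih

theorem pv_mapIdx_id {α : Type} (l : List α) : l.mapIdx (fun _ s => s) = l := by
  simp [List.mapIdx_eq_zipIdx_map]

-- one pass of index-wise modifications over all indices is a mapIdx
theorem pv_range_modify_fold {α : Type} (l : List α) (f : Nat → α → α) :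
    (List.range l.length).foldl (fun ss j => ss.modify j (f j)) l = l.mapIdx f := by
  induction l generalizing f with
  | nil => simp
  | cons a t ih =>
      have shift : ∀ (ns : List Nat) (b : α) (u : List α),
          (ns.map (· + 1)).foldl (fun ss j => ss.modify j (f j)) (b :: u)
            = b :: ns.foldl (fun ss j => ss.modify j (fun x => f (j + 1) x)) u := by
        intro ns
        induction ns with
        | nil => intro b u; rfl
        | cons n ns ihn =>
            intro b u
            simp only [List.map_cons, List.foldl_cons, List.modify_succ_cons]
            exact ihn b (u.modify n (fun x => f (n + 1) x))
      simp only [List.length_cons, List.range_succ_eq_map, List.foldl_cons,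
        List.modify_zero_cons, List.mapIdx_cons]
      rw [shift, ih]

-- the row-major accumulation pass produces, at each index j, the set of column-j values
theorem pv_colfold (w : Nat) (rows : List (List Int)) :
    ∀ (sets : List (PySem.Set Int)), sets.length = w →
      rows.foldl (fun ss row => (List.range w).foldl
          (fun s2 j => s2.modify j (fun s => PySem.Set.add s (row.getD j 0))) ss) sets
        = sets.mapIdx (fun j s => PySem.Set.update s (rows.map (fun r => r.getD j 0))) := by
  induction rows with
  | nil =>
      intro sets _
      simp only [List.foldl_nil, List.map_nil, PySem.Set.update, List.foldl_nil]
      exact (pv_mapIdx_id sets).symm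
  | cons row rows ih =>
      intro sets h
      simp only [List.foldl_cons]
      have hstep : (List.range w).foldl
          (fun s2 j => s2.modify j (fun s => PySem.Set.add s (row.getD j 0))) sets
          = sets.mapIdx (fun j s => PySem.Set.add s (row.getD j 0)) := by
        rw [← h]
        exact pv_range_modify_fold sets (fun j s => PySem.Set.add s (row.getD j 0))
      rw [hstep, ih _ (by simp [h]), List.mapIdx_mapIdx]
      rfl

-- sorted canonical signatures of two duplicate-free lists coincide iff they are equal as sets
theorem pv_sig_eq_iff (s t : PySem.Set Int) (hs : List.Nodup s) (ht : List.Nodup t) :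
    (PySem.List.sorted s (fun x => x) = PySem.List.sorted t (fun x => x)) ↔ PySem.Set.equal s t = true := by
  rw [PySem.List.sorted_id_eq_sorted_id_iff_perm, PySem.Set.equal_iff,
    List.perm_ext_iff_of_nodup hs ht]

theorem count_eq_alt (matrix : List (List Int)) (h : Pre_count matrix) :
    count matrix = count_alt matrix := by
  obtain ⟨hne, hrows⟩ := h
  obtain ⟨r0, rest, rfl⟩ : ∃ r0 rest, matrix = r0 :: rest := by
    cases matrix with
    | nil => exact absurd rfl hne
    | cons a b => exact ⟨a, b, rfl⟩
  simp only [List.headD_cons] at hrows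
  unfold count count_alt
  dsimp only
  rw [PySem.List.pyGetD_zero_cons]
  set m := r0 :: rest with hm
  set w : Nat := r0.length - 1 with hw
  have hwid : ((r0.length : Int) - 1) = (w : Int) := by
    have : 0 < r0.length := by
      have := (hrows r0 (by simp [hm])).1
      cases r0 with
      | nil => simp_all
      | cons a t => simp
    omega
  rw [hwid]
  have hrange : PySem.List.pyRange 0 (w : Int) 1 = (List.range w).map (fun (k : Nat) => (k : Int)) := by
    rw [PySem.List.pyRange_one]
    simp only [Int.sub_zero, Int.toNat_natCast, zero_add]
  rw [hrange]
  -- B's pair fold splits into the target-set fold and the column-sets fold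
  rw [PySem.List.foldl_prod_mk
    (f := fun (s : PySem.Set Int) row => PySem.Set.add s (PySem.List.pyGetD row (-1) 0))
    (g := fun (ss : List (PySem.Set Int)) row => ((List.range w).map (fun (k : Nat) => (k : Int))).foldl
      (fun sets j => sets.modify j.toNat (fun s => PySem.Set.add s (PySem.List.pyGetD row j 0))) ss)]
  -- B's target set is the set of per-row last elements
  have htarget : m.foldl (fun (s : PySem.Set Int) row => PySem.Set.add s (PySem.List.pyGetD row (-1) 0))
      PySem.Set.empty = PySem.Set.ofList (m.map (fun r => PySem.List.pyGetD r (-1) 0)) := by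
    rw [PySem.Set.ofList_eq_foldl, List.foldl_map]; rfl
  rw [htarget]
  -- the inner index fold over Int casts is the Nat-index fold
  have hinner : ∀ (row : List Int) (ss : List (PySem.Set Int)),
      ((List.range w).map (fun (k : Nat) => (k : Int))).foldl
        (fun sets j => sets.modify j.toNat (fun s => PySem.Set.add s (PySem.List.pyGetD row j 0))) ss
      = (List.range w).foldl (fun sets j => sets.modify j (fun s => PySem.Set.add s (row.getD j 0))) ss := by
    intro row ss
    rw [List.foldl_map]
    simp only [Int.toNat_natCast, PySem.List.pyGetD_natCast]
  simp only [hinner]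
  -- B's column-sets list is the list of column value-sets, in index order
  have hcols : m.foldl (fun ss row => (List.range w).foldl
        (fun sets j => sets.modify j (fun s => PySem.Set.add s (row.getD j 0))) ss)
        (((List.range w).map (fun (k : Nat) => (k : Int))).map (fun _ => (PySem.Set.empty : PySem.Set Int)))
      = (List.range w).map (fun j => PySem.Set.ofList (m.map (fun r => r.getD j 0))) := by
    rw [pv_colfold w m _ (by simp)]
    apply List.ext_getElem
    · simp
    · intro i h1 h2
      simp only [List.getElem_mapIdx, List.getElem_map, List.getElem_range]
      rw [PySem.Set.ofList_eq_foldl]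
      rfl
  rw [hcols]
  -- the frequency-dict pass is Dict.counter over the column signatures; its lookup is a count
  have hfreq : ((List.range w).map (fun j => PySem.Set.ofList (m.map (fun r => r.getD j 0)))).foldl
      (fun d s => d.modify (PySem.List.sorted s (fun x => x)) 0 (fun c => c + 1)) PySem.Dict.empty
    = PySem.Dict.counter (((List.range w).map
        (fun j => PySem.Set.ofList (m.map (fun r => r.getD j 0)))).map
        (fun s => PySem.List.sorted s (fun x => x))) := by
    unfold PySem.Dict.counter
    simp only [List.foldl_map]
  rw [hfreq, PySem.Dict.getD_counter]
  -- A's counting loop is a countP over the same range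
  rw [List.foldl_map, PySem.List.foldl_if_add_one
    (p := fun (k : Nat) => PySem.Set.equal
      (PySem.Set.ofList ((PySem.List.pyRange 0 (m.length : Int) 1).map
        (fun i => PySem.List.pyGetD (PySem.List.pyGetD m i []) ((k : Int)) 0)))
      (PySem.Set.ofList ((PySem.List.pyRange 0 (m.length : Int) 1).map
        (fun i => PySem.List.pyGetD (PySem.List.pyGetD m i []) (-1) 0))))]
  rw [List.map_map, List.count_eq_countP, List.countP_map]
  simp only [zero_add]
  congr 1
  apply List.countP_congr
  intro k hk
  rw [pv_map_range m (fun r => PySem.List.pyGetD r ((k : Int)) 0),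
    pv_map_range m (fun r => PySem.List.pyGetD r (-1) 0)]
  simp only [Function.comp_apply, PySem.List.pyGetD_natCast]
  have := pv_sig_eq_iff (PySem.Set.ofList (m.map (fun r => r.getD k 0)))
    (PySem.Set.ofList (m.map (fun r => PySem.List.pyGetD r (-1) 0)))
    (PySem.Set.nodup_ofList _) (PySem.Set.nodup_ofList _)
  rw [beq_iff_eq]
  exact this.symm

-- ===== VERDICT (by name: the statement is the Claim_ definition above) =====
theorem count_spec : Claim_equal_count := by
  intro matrix _ hpre
  unfold Spec_count
  exact count_eq_alt matrix hpre
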